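-- pv_equiv track=rewrite | github.com/Dimm-ddr/loudlyproud | .tools/tags/transform.py | get_internal_name
-- ===== SOURCE A (Python) =====
-- def get_internal_name(tag: str) -> str:
--     """
--     Convert a display tag to its internal name format.
--
--     Args:
--         tag: The display tag to convert
--
--     Returns:
--         The internal name format of the tag
--     """
--     # Convert to lowercase
--     internal = tag.lower()
--
--     # Remove parenthetical suffixes like (YA), (NA), (BL)
--     if "(" in internal:
--         internal = internal.split("(")[0].strip()
--
--     # Replace special characters
--     internal = internal.replace("'", "")  # Remove apostrophes
--     internal = internal.replace(".", "")  # Remove dots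
--     internal = internal.replace(" ", "-")  # Replace spaces with hyphens
--
--     # Clean up multiple hyphens
--     while "--" in internal:
--         internal = internal.replace("--", "-")
--
--     # Remove leading/trailing hyphens
--     internal = internal.strip("-")
--
--     return internal
-- ===== SOURCE B (Python) =====
-- def get_internal_name(tag: str) -> str:
--     """Single-pass rewrite: cut at '(', then one loop that lowercases output,
--     drops apostrophes/dots and collapses space/hyphen runs to one '-'."""
--     s = tag.lower()
--     i = s.find("(")
--     if i != -1:
--         s = s[:i].strip()
--     out = []
--     for c in s:
--         if c == "'" or c == ".":
--             continue
--         if c == " " or c == "-":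
--             if out and out[-1] == "-":
--                 continue
--             out.append("-")
--         else:
--             out.append(c)
--     return "".join(out).strip("-")
-- ===== Notes on version B (the rewrite author's own statement) =====
-- stated objective: alternative
-- what changed: B replaces A's five whole-string passes (three replace calls plus a repeated while-replace that collapses double hyphens) with a single left-to-right loop over the prefix before the first opening parenthesis: it skips apostrophes and dots and appends a hyphen for a space or hyphen only when the last appended character is not already a hyphen.
import Mathlib
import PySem

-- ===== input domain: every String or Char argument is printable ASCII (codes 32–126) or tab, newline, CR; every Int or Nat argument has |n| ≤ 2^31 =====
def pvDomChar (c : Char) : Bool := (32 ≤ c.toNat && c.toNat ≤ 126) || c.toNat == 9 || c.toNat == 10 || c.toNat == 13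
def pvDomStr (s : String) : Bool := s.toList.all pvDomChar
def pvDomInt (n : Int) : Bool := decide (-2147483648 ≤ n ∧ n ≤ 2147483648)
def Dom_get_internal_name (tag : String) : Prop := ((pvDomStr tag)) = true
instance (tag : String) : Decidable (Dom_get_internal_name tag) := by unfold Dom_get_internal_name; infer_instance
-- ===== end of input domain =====

-- B rebuilds the name in one left-to-right pass (skip ' and ., collapse space/hyphen runs
-- while appending) instead of A's sequence of whole-string replace passes plus a
-- repeated while-replace; same return value on every input.

-- ===== PORT A =====
-- while "--" in internal: internal = internal.replace("--", "-")
-- Fuel-bounded loop; the fuel passed below (the string's length) is sufficient because each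
-- pass shortens the string (proved in pvWhileDD_eq_dedup below), so the guard only makes the
-- same computation total.
def pvWhileDD : Nat → List Char → List Char
  | 0, s => s
  | fuel+1, s =>
    if PySem.Chars.isIn ['-', '-'] s then
      pvWhileDD fuel (PySem.Chars.replace s ['-', '-'] ['-'])
    else s

def get_internal_name (tag : String) : String :=
  -- internal = tag.lower()
  let internal := PySem.Chars.lower tag.toList
  -- if "(" in internal: internal = internal.split("(")[0].strip()
  let internal :=
    if PySem.Chars.isIn ['('] internal then
      PySem.Chars.strip (PySem.List.pyGetD (PySem.Chars.splitOn internal ['(']) 0 [])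
    else internal
  -- internal = internal.replace("'", "")
  let internal := PySem.Chars.replace internal ['\''] []
  -- internal = internal.replace(".", "")
  let internal := PySem.Chars.replace internal ['.'] []
  -- internal = internal.replace(" ", "-")
  let internal := PySem.Chars.replace internal [' '] ['-']
  -- while "--" in internal: internal = internal.replace("--", "-")
  let internal := pvWhileDD internal.length internal
  -- return internal.strip("-")
  String.ofList (PySem.Chars.stripChars internal ['-'])

-- ===== PORT B =====
def get_internal_name_alt (tag : String) : String :=
  -- s = tag.lower()
  let s := PySem.Chars.lower tag.toList
  -- i = s.find("(")
  let i := PySem.Chars.find s ['(']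
  -- if i != -1: s = s[:i].strip()
  let s := if i ≠ -1 then PySem.Chars.strip (PySem.Chars.slice s none (some i)) else s
  -- out = []; for c in s: …
  let out := s.foldl
    (fun out c =>
      if c = '\'' ∨ c = '.' then out
      else if c = ' ' ∨ c = '-' then
        -- if out and out[-1] == "-": continue  else out.append("-")
        (if out ≠ [] ∧ PySem.List.pyGetD out (-1) ' ' = '-' then out else out ++ ['-'])
      else out ++ [c]) []
  -- return "".join(out).strip("-")
  String.ofList (PySem.Chars.stripChars out ['-'])

-- ===== PRECONDITION & SPEC =====
def Spec_get_internal_name (tag : String) (out : String) : Prop := out = get_internal_name_alt tag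
instance (tag : String) (out : String) : Decidable (Spec_get_internal_name tag out) := by unfold Spec_get_internal_name; infer_instance

-- ===== CLAIM (what is proved, stated in full; the proofs are below) =====
def Claim_equal_get_internal_name : Prop := ∀ (tag : String), Dom_get_internal_name tag → Spec_get_internal_name tag (get_internal_name tag)

-- ===== LEMMAS AND PROOFS =====

-- pure form of one pass of replace("--", "-")
def pvRepl : List Char → List Char
  | '-' :: '-' :: t => '-' :: pvRepl t
  | c :: t => c :: pvRepl t
  | [] => []

-- pure form of the while loop's fixpoint: collapse runs of '-' (state = last emitted char is '-')
def pvDedup : Bool → List Char → List Char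
  | _, [] => []
  | b, c :: t => if c = '-' then (if b then pvDedup true t else '-' :: pvDedup true t) else c :: pvDedup false t

-- pure form of B's loop body (state = last appended char is '-')
def pvH : Bool → List Char → List Char
  | _, [] => []
  | b, c :: t =>
    if c = '\'' ∨ c = '.' then pvH b t
    else if c = ' ' ∨ c = '-' then (if b then pvH true t else '-' :: pvH true t)
    else c :: pvH false t

-- replace with a single-char pattern is a flatMap
theorem pvReplaceGo_singleton (a : Char) (new : List Char) :
    ∀ (fuel : Nat) (l acc : List Char), l.length ≤ fuel →
      PySem.Chars.replace.go [a] new fuel l acc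
        = acc.reverse ++ l.flatMap (fun x => if x = a then new else [x]) := by
  intro fuel
  induction fuel with
  | zero =>
    intro l acc h
    have : l = [] := by cases l <;> simp_all
    subst this
    simp [PySem.Chars.replace.go]
  | succ n ih =>
    intro l acc h
    cases l with
    | nil => simp [PySem.Chars.replace.go]
    | cons c t =>
      rw [PySem.Chars.replace.go]
      by_cases hc : c = a
      · subst hc
        simp only [List.isPrefixOf, BEq.rfl, Bool.true_and, if_true]
        rw [ih _ _ (by simpa using Nat.le_of_succ_le_succ h)]
        simp
      · have : [a].isPrefixOf (c :: t) = false := by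
          simp [List.isPrefixOf]
          exact fun h' => absurd h'.symm hc
        rw [this]
        simp only [Bool.false_eq_true, if_false]
        rw [ih _ _ (by simpa using Nat.le_of_succ_le_succ h)]
        simp [hc]

theorem pvReplace_del (a : Char) (l : List Char) :
    PySem.Chars.replace l [a] [] = l.filter (fun x => x ≠ a) := by
  rw [PySem.Chars.replace]
  simp only [List.isEmpty]
  rw [pvReplaceGo_singleton a [] l.length l [] le_rfl]
  simp
  induction l with
  | nil => simp
  | cons c t ih => by_cases hc : c = a <;> simp [hc, ih]

theorem pvReplace_map (a b : Char) (l : List Char) :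
    PySem.Chars.replace l [a] [b] = l.map (fun x => if x = a then b else x) := by
  rw [PySem.Chars.replace]
  simp only [List.isEmpty]
  rw [pvReplaceGo_singleton a [b] l.length l [] le_rfl]
  simp
  induction l with
  | nil => simp
  | cons c t ih => by_cases hc : c = a <;> simp [hc, ih]

theorem pvReplaceGo_dd :
    ∀ (fuel : Nat) (l acc : List Char), l.length ≤ fuel →
      PySem.Chars.replace.go ['-', '-'] ['-'] fuel l acc = acc.reverse ++ pvRepl l := by
  intro fuel
  induction fuel with
  | zero =>
    intro l acc h
    have : l = [] := by cases l <;> simp_all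
    subst this
    simp [PySem.Chars.replace.go, pvRepl]
  | succ n ih =>
    intro l acc h
    cases l with
    | nil => simp [PySem.Chars.replace.go, pvRepl]
    | cons c t =>
      rw [PySem.Chars.replace.go]
      by_cases hp : ['-', '-'].isPrefixOf (c :: t) = true
      · rw [if_pos hp]
        obtain ⟨c2, t', rfl⟩ : ∃ c2 t', t = c2 :: t' := by
          cases t with
          | nil => simp [List.isPrefixOf] at hp
          | cons c2 t' => exact ⟨c2, t', rfl⟩
        have hc : '-' = c ∧ '-' = c2 := by
          simpa [List.isPrefixOf] using hp
        obtain ⟨h1, h2⟩ := hc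
        have hc : c = '-' ∧ c2 = '-' := ⟨h1.symm, h2.symm⟩
        obtain ⟨rfl, rfl⟩ := hc
        rw [ih _ _ (by simp at h ⊢; omega)]
        simp [pvRepl]
      · rw [if_neg hp]
        rw [ih _ _ (by simp at h ⊢; omega)]
        have : pvRepl (c :: t) = c :: pvRepl t := by
          cases t with
          | nil =>
            by_cases h1 : c = '-' <;> simp [pvRepl, h1]
          | cons c2 t' =>
            by_cases h1 : c = '-' <;> by_cases h2 : c2 = '-' <;>
              simp_all [List.isPrefixOf, pvRepl]
        rw [this]
        simp

theorem pvReplace_dd (l : List Char) :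
    PySem.Chars.replace l ['-', '-'] ['-'] = pvRepl l := by
  rw [PySem.Chars.replace]
  simp only [List.isEmpty]
  rw [pvReplaceGo_dd l.length l [] le_rfl]
  simp

theorem pvRepl_len_le (l : List Char) : (pvRepl l).length ≤ l.length := by
  fun_induction pvRepl l <;> simp_all <;> omega

theorem pvRepl_len_lt (l : List Char) (h : ['-', '-'] <:+: l) : (pvRepl l).length < l.length := by
  fun_induction pvRepl l with
  | case1 t ih =>
    have := pvRepl_len_le t
    simp
    omega
  | case2 c t hne ih =>
    rcases List.infix_cons_iff.mp h with hpre | hinf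
    · exfalso
      rcases hpre with ⟨r, hr⟩
      simp at hr
      exact hne r hr.1.symm hr.2.symm
    · have := ih hinf
      simp
      omega
  | case3 => simp at h

theorem pvDedup_pvRepl (l : List Char) : ∀ b, pvDedup b (pvRepl l) = pvDedup b l := by
  fun_induction pvRepl l with
  | case1 t ih =>
    intro b
    cases b <;> simp [pvDedup, ih]
  | case2 c t hne ih =>
    intro b
    by_cases hc : c = '-' <;> cases b <;> simp [pvDedup, hc, ih]
  | case3 => intro b; rfl

theorem pvDedup_of_noDD : ∀ (l : List Char) (b : Bool), ¬ ['-', '-'] <:+: l →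
    (b = true → l.head? ≠ some '-') → pvDedup b l = l := by
  intro l
  induction l with
  | nil => intro b _ _; rfl
  | cons c t ih =>
    intro b hno hb
    have hnt : ¬ ['-', '-'] <:+: t := fun h => hno (h.trans (List.infix_cons_iff.mpr (Or.inr (List.infix_refl t))))
    by_cases hc : c = '-'
    · subst hc
      have hbf : b = false := by
        cases b
        · rfl
        · exact absurd (hb rfl) (by simp)
      subst hbf
      have hth : t.head? ≠ some '-' := by
        intro hh
        cases t with
        | nil => simp at hh
        | cons d t' =>
          simp at hh
          subst hh
          exact hno ⟨[], t', by simp⟩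
      simp [pvDedup, ih true hnt (fun _ => hth)]
    · simp [pvDedup, hc, ih false hnt (by simp)]

theorem pvWhileDD_eq_dedup : ∀ (fuel : Nat) (s : List Char), s.length ≤ fuel →
    pvWhileDD fuel s = pvDedup false s := by
  intro fuel
  induction fuel with
  | zero =>
    intro s h
    have : s = [] := by cases s <;> simp_all
    subst this
    rfl
  | succ n ih =>
    intro s h
    rw [pvWhileDD]
    by_cases hin : PySem.Chars.isIn ['-', '-'] s = true
    · rw [if_pos hin, pvReplace_dd]
      have hinf : ['-', '-'] <:+: s := (PySem.Chars.isIn_iff_infix _ _).mp hin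
      rw [ih _ (by have := pvRepl_len_lt s hinf; omega)]
      exact pvDedup_pvRepl s false
    · rw [if_neg hin]
      have hninf : ¬ ['-', '-'] <:+: s :=
        (PySem.Chars.isIn_eq_false_iff _ _).mp (by simpa using hin)
      exact (pvDedup_of_noDD s false hninf (by simp)).symm

theorem pvFoldl_eq_pvH : ∀ (l acc : List Char) (b : Bool), (b = true ↔ acc.getLast? = some '-') →
    l.foldl
      (fun out c =>
        if c = '\'' ∨ c = '.' then out
        else if c = ' ' ∨ c = '-' then
          (if out ≠ [] ∧ PySem.List.pyGetD out (-1) ' ' = '-' then out else out ++ ['-'])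
        else out ++ [c]) acc = acc ++ pvH b l := by
  intro l
  induction l with
  | nil => intro acc b hb; simp [pvH]
  | cons c t ih =>
    intro acc b hb
    rw [List.foldl_cons]
    by_cases h1 : c = '\'' ∨ c = '.'
    · rw [if_pos h1]
      rw [ih acc b hb]
      simp [pvH, h1]
    · rw [if_neg h1]
      by_cases h2 : c = ' ' ∨ c = '-'
      · rw [if_pos h2]
        have hcond : (acc ≠ [] ∧ PySem.List.pyGetD acc (-1) ' ' = '-') ↔ acc.getLast? = some '-' := by
          constructor
          · rintro ⟨hne, hlast⟩
            rw [PySem.List.pyGetD_neg_one acc ' ' hne] at hlast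
            rw [List.getLast?_eq_some_getLast hne]
            exact congrArg some hlast
          · intro hl
            have hne : acc ≠ [] := by rintro rfl; simp at hl
            refine ⟨hne, ?_⟩
            rw [PySem.List.pyGetD_neg_one acc ' ' hne]
            rw [List.getLast?_eq_some_getLast hne] at hl
            exact Option.some.inj hl
        by_cases hb' : b = true
        · rw [if_pos (hcond.mpr (hb.mp hb'))]
          rw [ih acc b hb]
          simp [pvH, h1, h2, hb']
        · have : ¬ (acc ≠ [] ∧ PySem.List.pyGetD acc (-1) ' ' = '-') := fun hc => hb' (hb.mpr (hcond.mp hc))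
          rw [if_neg this]
          rw [ih (acc ++ ['-']) true (by simp)]
          have hbf : b = false := by cases b <;> simp_all
          simp [pvH, h1, h2, hbf]
      · rw [if_neg h2]
        rw [ih (acc ++ [c]) false (by
          simp
          intro hc
          exact h2 (Or.inr hc))]
        simp [pvH, h1, h2]

theorem pvMain (base : List Char) : ∀ b,
    pvDedup b (((base.filter (fun x => x ≠ '\'')).filter (fun x => x ≠ '.')).map
      (fun x => if x = ' ' then '-' else x)) = pvH b base := by
  induction base with
  | nil => intro b; rfl
  | cons c t ih =>
    intro b
    by_cases h1 : c = '\'' ∨ c = '.'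
    · have hf : ((c :: t).filter (fun x => x ≠ '\'')).filter (fun x => x ≠ '.')
          = (t.filter (fun x => x ≠ '\'')).filter (fun x => x ≠ '.') := by
        rcases h1 with h1 | h1 <;> subst h1 <;> simp [List.filter_cons]
      rw [hf, ih b]
      have : pvH b (c :: t) = pvH b t := by
        rw [pvH]
        rw [if_pos h1]
      rw [this]
    · push_neg at h1
      have hf : ((c :: t).filter (fun x => x ≠ '\'')).filter (fun x => x ≠ '.')
          = c :: (t.filter (fun x => x ≠ '\'')).filter (fun x => x ≠ '.') := by
        simp [List.filter_cons, h1.1, h1.2]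
      rw [hf, List.map_cons]
      by_cases h2 : c = ' ' ∨ c = '-'
      · have hmap : (if c = ' ' then '-' else c) = '-' := by
          rcases h2 with h2 | h2 <;> simp [h2]
        rw [hmap]
        have hA : pvDedup b ('-' :: ((t.filter (fun x => x ≠ '\'')).filter (fun x => x ≠ '.')).map
            (fun x => if x = ' ' then '-' else x))
            = if b then pvH true t else '-' :: pvH true t := by
          rw [pvDedup, if_pos rfl, ih true]
        rw [hA]
        conv_rhs => rw [pvH]
        rcases h2 with h2 | h2 <;> simp [h1.1, h1.2, h2]
      · push_neg at h2
        have hmap : (if c = ' ' then '-' else c) = c := by simp [h2.1]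
        rw [hmap]
        rw [pvDedup, if_neg h2.2, ih]
        conv_rhs => rw [pvH]
        simp [h1.1, h1.2, h2.1, h2.2]

theorem pvSplitOnGo_head : ∀ (fuel : Nat) (l cur : List Char) (acc : List (List Char)), l.length < fuel →
    ∃ rest, PySem.Chars.splitOn.go ['('] fuel l cur acc
      = acc.reverse ++ (cur.reverse ++ l.takeWhile (fun x => x ≠ '(')) :: rest := by
  intro fuel
  induction fuel with
  | zero => intro l cur acc h; omega
  | succ n ih =>
    intro l cur acc h
    cases l with
    | nil =>
      refine ⟨[], ?_⟩
      simp [PySem.Chars.splitOn.go]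
    | cons c t =>
      rw [PySem.Chars.splitOn.go]
      by_cases hc : c = '('
      · subst hc
        rw [if_pos (by simp [List.isPrefixOf])]
        obtain ⟨r, hr⟩ := ih (t.drop 0) [] (cur.reverse :: acc) (by simp at h ⊢; omega)
        simp at hr
        refine ⟨((t.drop 0).takeWhile (fun x => x ≠ '(')) :: r, ?_⟩
        simp [hr]
      · rw [if_neg (by simp [List.isPrefixOf, hc]; intro h'; exact absurd h'.symm hc)]
        obtain ⟨r, hr⟩ := ih t (c :: cur) acc (by simp at h ⊢; omega)
        refine ⟨r, ?_⟩
        rw [hr]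
        simp [List.takeWhile_cons, hc]

theorem pvSplitOn_head (s : List Char) :
    PySem.List.pyGetD (PySem.Chars.splitOn s ['(']) 0 [] = s.takeWhile (fun x => x ≠ '(') := by
  rw [PySem.Chars.splitOn]
  obtain ⟨r, hr⟩ := pvSplitOnGo_head (s.length + 1) s [] [] (by omega)
  rw [hr]
  simp [PySem.List.pyGetD_zero_cons]

theorem pvTakeFind_aux : ∀ (s : List Char) (n : Nat) (c : Char), s[n]? = some c →
    (∀ j, j < n → s[j]? ≠ some c) → s.take n = s.takeWhile (fun x => x ≠ c) := by
  intro s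
  induction s with
  | nil => intro n c h; simp at h
  | cons a t ih =>
    intro n c h hmin
    cases n with
    | zero =>
      simp at h
      subst h
      simp [List.takeWhile_cons]
    | succ m =>
      have ha : a ≠ c := by
        intro hac
        exact hmin 0 (by omega) (by simp [hac])
      simp only [List.take_succ_cons, List.takeWhile_cons]
      rw [if_pos (by simp [ha])]
      rw [ih m c (by simpa using h) (fun j hj => by simpa using hmin (j+1) (by omega))]

theorem pvTake_find (s : List Char) (c : Char) (h : 0 ≤ PySem.Chars.find s [c]) :
    s.take (PySem.Chars.find s [c]).toNat = s.takeWhile (fun x => x ≠ c) := by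
  obtain ⟨hp, hmin⟩ := PySem.Chars.find_spec h
  apply pvTakeFind_aux s _ c
  · rcases hp with ⟨r, hr⟩
    have : (List.drop (PySem.Chars.find s [c]).toNat s)[0]? = some c := by
      rw [← hr]; rfl
    rwa [List.getElem?_drop, Nat.add_zero] at this
  · intro j hj hjc
    apply hmin j hj
    have hlt : j < s.length := by
      by_contra hge
      rw [List.getElem?_eq_none (by omega)] at hjc
      simp at hjc
    refine ⟨(s.drop j).tail, ?_⟩
    have : (s.drop j) = c :: (s.drop j).tail := by
      have h0 : (s.drop j)[0]? = some c := by rw [List.getElem?_drop, Nat.add_zero]; exact hjc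
      cases hd : s.drop j with
      | nil => rw [hd] at h0; simp at h0
      | cons x xs => rw [hd] at h0; simp at h0; simp [h0]
    simpa using this.symm

-- ===== VERDICT (by name: the statement is the Claim_ definition above) =====
theorem get_internal_name_spec : Claim_equal_get_internal_name := by
  intro tag _
  unfold Spec_get_internal_name
  simp only [get_internal_name, get_internal_name_alt]
  set s := PySem.Chars.lower tag.toList with hs
  have hbase : (if PySem.Chars.find s ['('] ≠ -1
        then PySem.Chars.strip (PySem.Chars.slice s none (some (PySem.Chars.find s ['(']))) else s)
      = (if PySem.Chars.isIn ['('] s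
        then PySem.Chars.strip (PySem.List.pyGetD (PySem.Chars.splitOn s ['(']) 0 []) else s) := by
    by_cases hin : ['('] <:+: s
    · rw [if_pos ((PySem.Chars.isIn_iff_infix _ _).mpr hin),
        if_pos ((PySem.Chars.find_ne_neg_one_iff _ _).mpr hin)]
      have hpos : 0 ≤ PySem.Chars.find s ['('] := by
        have h1 := PySem.Chars.neg_one_le_find s ['(']
        have h2 := (PySem.Chars.find_ne_neg_one_iff s ['(']).mpr hin
        omega
      rw [PySem.Chars.slice_eq_listSlice, PySem.List.slice_to _ hpos,
        pvTake_find s '(' hpos, pvSplitOn_head]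
    · rw [if_neg (by
          intro hc
          exact hin ((PySem.Chars.find_ne_neg_one_iff _ _).mp hc)),
        if_neg (by
          intro hc
          exact hin ((PySem.Chars.isIn_iff_infix _ _).mp hc))]
  rw [hbase]
  generalize (if PySem.Chars.isIn ['('] s
      then PySem.Chars.strip (PySem.List.pyGetD (PySem.Chars.splitOn s ['(']) 0 []) else s) = base
  rw [pvReplace_del, pvReplace_del, pvReplace_map]
  rw [pvWhileDD_eq_dedup _ _ le_rfl]
  rw [pvFoldl_eq_pvH base [] false (by simp)]
  rw [pvMain base false]
  simp
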